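-- pv_equiv track=rewrite | github.com/Germanunkol/nav_mesh | nav_mesh/nav_mesh.py | get_subpath
-- ===== SOURCE A (Python) =====
-- def get_subpath( full_path, node ):
--     # Get the subpath of full_path which starts after "node"
--     subpath = []
--     node_found = False
--     for n in full_path:
--         if node_found:
--             subpath.append( n )
--         if n == node:
--             node_found = True
--     return subpath
-- ===== SOURCE B (Python) =====
-- def get_subpath(full_path, node):
--     # Locate the first occurrence of node, then slice the tail after it.
--     items = list(full_path)
--     try:
--         i = items.index(node)
--     except ValueError:
--         return []
--     return items[i + 1:]
-- ===== Notes on version B (the rewrite author's own statement) =====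
-- stated objective: simpler
-- what changed: Replaced the flag-and-append forward loop with a locate-then-slice decomposition: find the first index of node with list.index and return the slice after it.
import Mathlib
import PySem

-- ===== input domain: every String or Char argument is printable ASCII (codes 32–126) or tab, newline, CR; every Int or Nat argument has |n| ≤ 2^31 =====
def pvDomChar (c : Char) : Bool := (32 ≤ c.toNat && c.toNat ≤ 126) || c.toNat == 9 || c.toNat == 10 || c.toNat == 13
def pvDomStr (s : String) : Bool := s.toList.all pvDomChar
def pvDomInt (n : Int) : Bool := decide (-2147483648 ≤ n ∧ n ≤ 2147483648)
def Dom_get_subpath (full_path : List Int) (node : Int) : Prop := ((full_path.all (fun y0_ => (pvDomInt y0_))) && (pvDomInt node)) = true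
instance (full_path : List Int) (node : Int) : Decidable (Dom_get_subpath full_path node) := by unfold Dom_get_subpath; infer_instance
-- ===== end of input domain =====

-- B replaces A's flag-and-append loop with locate-then-slice (simpler decomposition).

-- ===== PORT A =====
-- flag-and-append loop: state is (subpath, node_found)
def get_subpath (full_path : List Int) (node : Int) : List Int :=
  (full_path.foldl
    (fun (st : List Int × Bool) n =>
      (if st.2 then st.1 ++ [n] else st.1, st.2 || (n == node)))
    ([], false)).1

-- ===== PORT B =====
-- items.index(node) then items[i+1:]; the slice's start i+1 is nonnegative, so it is List.drop
def get_subpath_alt (full_path : List Int) (node : Int) : List Int :=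
  match PySem.List.index? full_path node with
  | none => []
  | some i => full_path.drop (i + 1)

-- ===== PRECONDITION & SPEC =====
def Spec_get_subpath (full_path : List Int) (node : Int) (out : List Int) : Prop := out = get_subpath_alt full_path node
instance (full_path : List Int) (node : Int) (out : List Int) : Decidable (Spec_get_subpath full_path node out) := by unfold Spec_get_subpath; infer_instance

-- ===== CLAIM (what is proved, stated in full; the proofs are below) =====
def Claim_equal_get_subpath : Prop := ∀ (full_path : List Int) (node : Int), Dom_get_subpath full_path node → Spec_get_subpath full_path node (get_subpath full_path node)

-- ===== LEMMAS AND PROOFS =====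

-- once the flag is set, the loop appends every remaining element
theorem get_subpath_found (node : Int) (fp acc : List Int) :
    (fp.foldl
      (fun (st : List Int × Bool) n =>
        (if st.2 then st.1 ++ [n] else st.1, st.2 || (n == node)))
      (acc, true)).1 = acc ++ fp := by
  induction fp generalizing acc with
  | nil => simp
  | cons x xs ih => simp [List.foldl, ih]

theorem get_subpath_main (node : Int) (fp : List Int) :
    (fp.foldl
      (fun (st : List Int × Bool) n =>
        (if st.2 then st.1 ++ [n] else st.1, st.2 || (n == node)))
      ([], false)).1 = get_subpath_alt fp node := by
  induction fp with
  | nil => simp [get_subpath_alt, PySem.List.index?]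
  | cons x xs ih =>
    by_cases hx : x = node
    · subst hx
      rw [List.foldl_cons]
      simp only [Bool.false_or, beq_self_eq_true, if_neg (by simp : ¬(false = true))]
      rw [get_subpath_found]
      simp [get_subpath_alt, PySem.List.index?, List.idxOf?_cons]
    · have hne : (x == node) = false := by simp [hx]
      rw [List.foldl_cons]
      simp only [hne, Bool.false_or, if_neg (by simp : ¬(false = true))]
      rw [ih]
      simp only [get_subpath_alt, PySem.List.index?_cons_of_ne xs hx]
      cases h : PySem.List.index? xs node with
      | none => simp
      | some i => simp [List.drop]

-- ===== VERDICT (by name: the statement is the Claim_ definition above) =====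
theorem get_subpath_spec : Claim_equal_get_subpath := by
  intro fp node _
  unfold Spec_get_subpath get_subpath
  exact get_subpath_main node fp
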